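-- pv_equiv track=rewrite | github.com/shahzaibkhan2/Python-Advance-Projects-For-Science-Students | code-for-physics-subject/code-for-hund's-rule/hund's_rule.py | hunds_rule
-- ===== SOURCE A (Python) =====
-- def hunds_rule(num_electrons):
--     orbitals = []
--     electrons_left = num_electrons
--
--     while electrons_left > 0:
--         max_electrons = min(2, electrons_left)
--         orbitals.append(max_electrons)
--         electrons_left -= max_electrons
--
--     return orbitals
-- ===== SOURCE B (Python) =====
-- def hunds_rule(num_electrons):
--     if num_electrons <= 0:
--         return []
--     full, rem = divmod(num_electrons, 2)
--     orbitals = [2] * full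
--     if rem > 0:
--         orbitals.append(rem)
--     return orbitals
-- ===== Notes on version B (the rewrite author's own statement) =====
-- stated objective: simpler
-- what changed: Replaces the per-orbital subtraction loop with a single closed-form divmod: the number of full pairs and the remainder are computed arithmetically and the list is built with list repetition.
import Mathlib
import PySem

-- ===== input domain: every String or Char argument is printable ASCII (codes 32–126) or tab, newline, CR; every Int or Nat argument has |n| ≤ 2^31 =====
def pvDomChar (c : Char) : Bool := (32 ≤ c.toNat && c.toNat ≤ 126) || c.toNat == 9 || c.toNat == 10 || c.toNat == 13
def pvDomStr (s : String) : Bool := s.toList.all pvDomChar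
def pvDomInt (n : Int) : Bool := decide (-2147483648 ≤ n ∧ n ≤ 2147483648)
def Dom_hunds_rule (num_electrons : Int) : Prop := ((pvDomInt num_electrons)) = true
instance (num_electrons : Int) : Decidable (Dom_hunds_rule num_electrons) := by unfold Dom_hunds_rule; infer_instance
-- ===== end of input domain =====

-- ===== PORT A =====
-- B replaces A's per-orbital subtraction loop with a closed-form divmod (objective: simpler).
def hundsLoop (orbitals : List Int) (electrons_left : Int) : List Int :=
  if h : electrons_left > 0 then
    let max_electrons := min 2 electrons_left
    hundsLoop (orbitals ++ [max_electrons]) (electrons_left - max_electrons)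
  else orbitals
termination_by electrons_left.toNat
decreasing_by
  simp only [min_def]
  split <;> omega

def hunds_rule (num_electrons : Int) : List Int :=
  hundsLoop [] num_electrons

-- ===== PORT B =====
def hunds_rule_alt (num_electrons : Int) : List Int :=
  if num_electrons ≤ 0 then []
  else
    let full := PySem.Int.floordiv num_electrons 2
    let rem := PySem.Int.mod num_electrons 2
    let orbitals := List.replicate full.toNat 2
    if rem > 0 then orbitals ++ [rem] else orbitals

-- ===== PRECONDITION & SPEC =====
def Spec_hunds_rule (num_electrons : Int) (out : List Int) : Prop := out = hunds_rule_alt num_electrons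
instance (num_electrons : Int) (out : List Int) : Decidable (Spec_hunds_rule num_electrons out) := by unfold Spec_hunds_rule; infer_instance

-- ===== CLAIM (what is proved, stated in full; the proofs are below) =====
def Claim_equal_hunds_rule : Prop := ∀ (num_electrons : Int), Dom_hunds_rule num_electrons → Spec_hunds_rule num_electrons (hunds_rule num_electrons)

-- ===== LEMMAS AND PROOFS =====
-- alt peels off a 2 for every input ≥ 2
theorem alt_step (n : Int) (h : 2 ≤ n) :
    hunds_rule_alt n = 2 :: hunds_rule_alt (n - 2) := by
  by_cases hle : n ≤ 3
  · have : n = 2 ∨ n = 3 := by omega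
    rcases this with rfl | rfl <;> decide
  · have h2 : (0:Int) < 2 := by omega
    have hm : n % 2 = (n - 2) % 2 := by omega
    have hrep : (n / 2).toNat = ((n - 2) / 2).toNat + 1 := by omega
    simp only [hunds_rule_alt, PySem.Int.floordiv_eq_ediv_of_pos h2,
      PySem.Int.mod_eq_emod_of_pos h2]
    rw [if_neg (show ¬ n ≤ 0 by omega), if_neg (show ¬ n - 2 ≤ 0 by omega),
      hrep, hm, List.replicate_succ]
    split <;> rfl

theorem loop_eq (k : Nat) : ∀ (acc : List Int) (n : Int), n.toNat ≤ k →
    hundsLoop acc n = acc ++ hunds_rule_alt n := by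
  induction k with
  | zero =>
    intro acc n hn
    rw [hundsLoop]
    rw [dif_neg (show ¬ n > 0 by omega)]
    simp [hunds_rule_alt, show n ≤ 0 by omega]
  | succ k ih =>
    intro acc n hn
    rw [hundsLoop]
    by_cases h : n > 0
    · rw [dif_pos h]
      by_cases h2 : 2 ≤ n
      · have hmin : min (2:Int) n = 2 := by omega
        simp only [hmin]
        rw [ih (acc ++ [2]) (n - 2) (by omega), alt_step n h2]
        simp
      · have h1 : n = 1 := by omega
        subst h1
        have hmin : min (2:Int) 1 = 1 := by decide
        simp only [hmin]
        rw [show (1:Int) - 1 = 0 from by norm_num, ih (acc ++ [1]) 0 (by omega)]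
        simp [show hunds_rule_alt 0 = [] from by decide,
          show hunds_rule_alt 1 = [1] from by decide]
    · rw [dif_neg h]
      simp [hunds_rule_alt, show n ≤ 0 by omega]

-- ===== VERDICT (by name: the statement is the Claim_ definition above) =====
theorem hunds_rule_spec : Claim_equal_hunds_rule := by
  intro n _
  unfold Spec_hunds_rule hunds_rule
  simpa using loop_eq n.toNat [] n (le_refl _)
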